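-- pv_equiv track=rewrite | github.com/BenFaruna/49ja_game | helper_functions.py | color_count
-- ===== SOURCE A (Python) =====
-- def decide_number_color(num: int) -> tuple[int, str]:
--     """
--     From number decide the color in grid
--     :param num: number that will be used to determine color
--     :return: tuple containing number and color
--     """
--     num = int(num)
--     grids = {
--         (1, 13, 25, 37, 4, 16, 28, 40, 7, 19, 31, 43, 10, 22, 34, 46): "Red",
--         (2, 14, 26, 38, 5, 17, 29, 41, 8, 20, 32, 44, 11, 23, 35, 47): "Blue",
--         (3, 15, 27, 39, 6, 18, 30, 42, 9, 21, 33, 45, 12, 24, 36, 48): "Green",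
--         (49,): "Yellow"
--     }
--
--     for tup in grids.keys():
--         if num in tup:
--             return num, grids[tup]
--
-- def color_count(nums: list) -> dict:
--     """
--     from the results get the color count and winning color from the count
--     :param nums: variable arguments passed
--     :return: dictionary containing count of colors of numbers in the grid
--     """
--     color_num = {
--         "Red": 0,
--         "Blue": 0,
--         "Green": 0,
--         "Yellow": 0
--     }
--
--     for num in nums:
--         num_color = decide_number_color(num)
--         color_num[num_color[1]] += 1
--
--     return color_num
-- ===== SOURCE B (Python) =====
-- def color_count(nums: list) -> dict:
--     """Tally grid colors by a closed-form arithmetic rule instead of scanning grid tuples."""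
--     counts = {"Red": 0, "Blue": 0, "Green": 0, "Yellow": 0}
--     for num in nums:
--         n = int(num)
--         if n == 49:
--             color = "Yellow"
--         elif n % 3 == 1:
--             color = "Red"
--         elif n % 3 == 2:
--             color = "Blue"
--         else:
--             color = "Green"
--         counts[color] += 1
--     return counts
-- ===== Notes on version B (the rewrite author's own statement) =====
-- stated objective: simpler
-- what changed: Replaces the per-number linear scan over four hard-coded grid tuples with a closed-form modulo-three rule (with the lone Yellow number special-cased); the tally loop stays a single pass.
import Mathlib
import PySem

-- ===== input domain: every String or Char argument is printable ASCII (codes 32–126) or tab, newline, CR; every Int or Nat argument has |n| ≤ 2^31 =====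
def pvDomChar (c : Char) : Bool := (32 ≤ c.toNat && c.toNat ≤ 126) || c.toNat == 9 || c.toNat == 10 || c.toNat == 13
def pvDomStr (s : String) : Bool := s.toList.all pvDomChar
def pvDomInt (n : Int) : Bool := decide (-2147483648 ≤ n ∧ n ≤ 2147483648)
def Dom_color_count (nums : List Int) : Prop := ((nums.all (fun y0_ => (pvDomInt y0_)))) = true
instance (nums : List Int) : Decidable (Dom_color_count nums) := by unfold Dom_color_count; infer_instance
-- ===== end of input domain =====

-- B replaces A's per-number scan over four hard-coded grid tuples with a closed-form n % 3 rule (49 = Yellow); same single-pass tally.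


-- ===== PORT A =====
-- decide_number_color: scan the grid tuples in dict order; none = Python's bare None (falls off the loop)
def decideNumberColorLoop (num : Int) : List (List Int × String) → Option (Int × String)
  | [] => none
  | (tup, c) :: rest => if num ∈ tup then some (num, c) else decideNumberColorLoop num rest

def decideNumberColor (num : Int) : Option (Int × String) :=
  decideNumberColorLoop num
    [([1, 13, 25, 37, 4, 16, 28, 40, 7, 19, 31, 43, 10, 22, 34, 46], "Red"),
     ([2, 14, 26, 38, 5, 17, 29, 41, 8, 20, 32, 44, 11, 23, 35, 47], "Blue"),
     ([3, 15, 27, 39, 6, 18, 30, 42, 9, 21, 33, 45, 12, 24, 36, 48], "Green"),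
     ([49], "Yellow")]

-- color_count: tally loop; the `none` branch (Python TypeError) is excluded by Pre_color_count
def color_count (nums : List Int) : List (String × Int) :=
  (nums.foldl (fun d num =>
      match decideNumberColor num with
      | some p => d.modify p.2 0 (· + 1)
      | none => d)
    (PySem.Dict.ofList [("Red", (0 : Int)), ("Blue", 0), ("Green", 0), ("Yellow", 0)])).items

-- ===== PORT B =====
def altColor (n : Int) : String :=
  if n = 49 then "Yellow"
  else if PySem.Int.mod n 3 = 1 then "Red"
  else if PySem.Int.mod n 3 = 2 then "Blue"
  else "Green"

def color_count_alt (nums : List Int) : List (String × Int) :=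
  (nums.foldl (fun d n => d.modify (altColor n) 0 (· + 1))
    (PySem.Dict.ofList [("Red", (0 : Int)), ("Blue", 0), ("Green", 0), ("Yellow", 0)])).items

-- ===== PRECONDITION & SPEC =====
-- Pre_ excludes numbers outside 1..49: there decide_number_color returns None and A raises TypeError on None[1]
def Pre_color_count (nums : List Int) : Prop := ∀ n ∈ nums, 1 ≤ n ∧ n ≤ 49
instance (nums : List Int) : Decidable (Pre_color_count nums) := by unfold Pre_color_count; infer_instance
def pvWitness_color_count : List Int := [1, 2, 3, 49, 17, 48]

def Spec_color_count (nums : List Int) (out : List (String × Int)) : Prop := out = color_count_alt nums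
instance (nums : List Int) (out : List (String × Int)) : Decidable (Spec_color_count nums out) := by unfold Spec_color_count; infer_instance

-- ===== CLAIM (what is proved, stated in full; the proofs are below) =====
def Claim_equal_color_count : Prop := ∀ (nums : List Int), Dom_color_count nums → Pre_color_count nums → Spec_color_count nums (color_count nums)

-- ===== LEMMAS AND PROOFS =====
lemma step_eq (n : Int) (h1 : 1 ≤ n) (h2 : n ≤ 49) :
    decideNumberColor n = some (n, altColor n) := by
  interval_cases n <;> rfl

-- ===== VERDICT (by name: the statement is the Claim_ definition above) =====
theorem color_count_spec : Claim_equal_color_count := by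
  intro nums _ hpre
  unfold Spec_color_count color_count color_count_alt
  congr 1
  apply PySem.List.foldl_congr_mem
  intro d n hn
  rw [step_eq n (hpre n hn).1 (hpre n hn).2]
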